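-- pv_equiv track=rewrite | github.com/cola1998/- | 2013-12.py | judgeQ
-- ===== SOURCE A (Python) =====
-- def judgeQ(n):
--     if n[0] == '0':
--         return False
--     if n.replace('0', '').replace('1', '').replace('2', '').replace('3','') == '':
--         if n.count('0') >= 1 and n.count('1') >= 1 and n.count('2') >= 1 and n.count('3') >= 1:
--             pass
--         else:
--             return False
--     else:
--         return False
--     l0 = []
--     l1 = []
--     l2 = []
--     l3 = []
--     for i in range(len(n)):
--         if n[i] == '0':
--             l0.append(i)
--         elif n[i] == '1':
--             l1.append(i)
--         elif n[i] == '2':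
--             l2.append(i)
--         elif n[i] == '3':
--             l3.append(i)
--     if l0[len(l0)-1] < l1[len(l1)-1]:
--         pass
--     else:
--         return False
--     if l2[len(l2)-1] < l3[len(l3)-1]:
--         return True
--     else:
--         return False
-- ===== SOURCE B (Python) =====
-- def judgeQ(n):
--     if n[0] == '0':
--         return False
--     # one reverse pass: a small state machine records, for each pair ('0','1') and
--     # ('2','3'), which of the two is met first from the right, plus presence flags.
--     s0 = s1 = s2 = s3 = False
--     ok01 = ok23 = None
--     for c in reversed(n):
--         if c == '0':
--             s0 = True
--             if ok01 is None:
--                 ok01 = False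
--         elif c == '1':
--             s1 = True
--             if ok01 is None:
--                 ok01 = True
--         elif c == '2':
--             s2 = True
--             if ok23 is None:
--                 ok23 = False
--         elif c == '3':
--             s3 = True
--             if ok23 is None:
--                 ok23 = True
--         else:
--             return False
--     return s0 and s1 and s2 and s3 and ok01 and ok23
-- ===== Notes on version B (the rewrite author's own statement) =====
-- stated objective: alternative
-- what changed: Replaces A's staged passes (replace-chain emptiness test, four count() checks, an index-collecting loop into four lists, then last-index comparisons) by a single reverse traversal with a small state machine: presence flags plus, per pair ('0','1') and ('2','3'), which member is met first from the right.
import Mathlib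
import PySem

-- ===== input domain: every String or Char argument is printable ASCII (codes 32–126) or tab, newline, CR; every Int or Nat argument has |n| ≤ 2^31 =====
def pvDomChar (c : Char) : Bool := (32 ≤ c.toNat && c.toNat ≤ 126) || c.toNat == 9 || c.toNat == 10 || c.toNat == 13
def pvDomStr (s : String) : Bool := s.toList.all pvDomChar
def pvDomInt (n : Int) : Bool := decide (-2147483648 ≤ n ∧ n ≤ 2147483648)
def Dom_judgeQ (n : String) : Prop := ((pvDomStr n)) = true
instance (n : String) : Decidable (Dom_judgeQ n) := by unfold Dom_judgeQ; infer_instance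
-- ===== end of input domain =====

-- B replaces A's staged passes (replace-chain, four counts, index-collecting loop,
-- last-index comparisons) by ONE reverse traversal with a small state machine;
-- objective: alternative (same O(n) cost, different algorithm).

-- ===== PORT A =====
def judgeQ (n : String) : Bool :=
  if PySem.Str.pyGet? n 0 == some '0' then false
  else if (PySem.Str.replace (PySem.Str.replace (PySem.Str.replace
            (PySem.Str.replace n "0" "") "1" "") "2" "") "3" "") = "" then
    if 1 ≤ PySem.Str.count n "0" ∧ 1 ≤ PySem.Str.count n "1" ∧
       1 ≤ PySem.Str.count n "2" ∧ 1 ≤ PySem.Str.count n "3" then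
      -- the index-collecting loop over range(len(n)) with four lists
      let quad := (PySem.List.pyRange 0 (PySem.Str.len n) 1).foldl
        (fun (s : List Int × List Int × List Int × List Int) i =>
          if PySem.Str.pyGet? n i == some '0' then (s.1 ++ [i], s.2.1, s.2.2.1, s.2.2.2)
          else if PySem.Str.pyGet? n i == some '1' then (s.1, s.2.1 ++ [i], s.2.2.1, s.2.2.2)
          else if PySem.Str.pyGet? n i == some '2' then (s.1, s.2.1, s.2.2.1 ++ [i], s.2.2.2)
          else if PySem.Str.pyGet? n i == some '3' then (s.1, s.2.1, s.2.2.1, s.2.2.2 ++ [i])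
          else s) ([], [], [], [])
      -- l0[len(l0)-1] etc.; under the count guard the lists are nonempty, the
      -- 'none' fallback is unreachable (Python would raise IndexError there)
      match PySem.List.pyGet? quad.1 ((quad.1.length : Int) - 1),
            PySem.List.pyGet? quad.2.1 ((quad.2.1.length : Int) - 1),
            PySem.List.pyGet? quad.2.2.1 ((quad.2.2.1.length : Int) - 1),
            PySem.List.pyGet? quad.2.2.2 ((quad.2.2.2.length : Int) - 1) with
      | some a0, some a1, some a2, some a3 =>
          if a0 < a1 then (if a2 < a3 then true else false) else false
      | _, _, _, _ => false
    else false
  else false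

-- ===== PORT B =====
-- the loop body of Source B: state = four presence flags + the two first-from-the-right
-- pair records (Option Bool, none = pair not met yet); early `return False` on a
-- non-alphabet character
def judgeQAltGo : List Char → Bool → Bool → Bool → Bool → Option Bool → Option Bool → Bool
  | [], s0, s1, s2, s3, ok01, ok23 =>
      s0 && s1 && s2 && s3 && ok01.getD false && ok23.getD false
  | c :: rest, s0, s1, s2, s3, ok01, ok23 =>
      if c == '0' then judgeQAltGo rest true s1 s2 s3 (some (ok01.getD false)) ok23
      else if c == '1' then judgeQAltGo rest s0 true s2 s3 (some (ok01.getD true)) ok23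
      else if c == '2' then judgeQAltGo rest s0 s1 true s3 ok01 (some (ok23.getD false))
      else if c == '3' then judgeQAltGo rest s0 s1 s2 true ok01 (some (ok23.getD true))
      else false

def judgeQ_alt (n : String) : Bool :=
  if PySem.Str.pyGet? n 0 == some '0' then false
  else judgeQAltGo n.toList.reverse false false false false none none

-- ===== PRECONDITION & SPEC =====
-- Pre_ excludes only the empty string, on which A raises IndexError at n[0] (B raises there too).
def Pre_judgeQ (n : String) : Prop := n ≠ ""
instance (n : String) : Decidable (Pre_judgeQ n) := by unfold Pre_judgeQ; infer_instance
def pvWitness_judgeQ : String := "2013"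
def Spec_judgeQ (n : String) (out : Bool) : Prop := out = judgeQ_alt n
instance (n : String) (out : Bool) : Decidable (Spec_judgeQ n out) := by unfold Spec_judgeQ; infer_instance

-- ===== CLAIM (what is proved, stated in full; the proofs are below) =====
def Claim_equal_judgeQ : Prop := ∀ (n : String), Dom_judgeQ n → Pre_judgeQ n → Spec_judgeQ n (judgeQ n)

-- ===== LEMMAS AND PROOFS =====

-- str.replace(c, '') removes every occurrence of the single character c
theorem replace_go_single (c : Char) : ∀ (l : List Char) (acc : List Char) (fuel : Nat),
    l.length ≤ fuel →
    PySem.Chars.replace.go [c] [] fuel l acc = acc.reverse ++ l.filter (fun x => !(x == c)) := by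
  intro l
  induction l with
  | nil =>
    intro acc fuel _
    cases fuel <;> simp [PySem.Chars.replace.go.eq_def]
  | cons h t ih =>
    intro acc fuel hf
    cases fuel with
    | zero => simp at hf
    | succ f =>
      rw [PySem.Chars.replace.go.eq_def]
      have hf' : t.length ≤ f := by simp at hf; omega
      by_cases hc : c = h
      · subst hc
        simp [ih _ _ hf']
      · have hb : (c == h) = false := by simp [hc]
        have hb2 : (h == c) = false := by simp [Ne.symm hc]
        simp [hb2, hc, ih _ _ hf']

theorem replace_single (cs : List Char) (c : Char) :
    PySem.Chars.replace cs [c] [] = cs.filter (fun x => !(x == c)) := by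
  have := replace_go_single c cs [] cs.length le_rfl
  simpa [PySem.Chars.replace] using this

-- str.count(c) for a single character c is the character count
theorem count_go_single (c : Char) : ∀ (l : List Char) (fuel acc : Nat),
    l.length ≤ fuel →
    PySem.Chars.count.go [c] fuel l acc = acc + l.count c := by
  intro l
  induction l with
  | nil =>
    intro fuel acc _
    cases fuel <;> simp [PySem.Chars.count.go.eq_def]
  | cons h t ih =>
    intro fuel acc hf
    cases fuel with
    | zero => simp at hf
    | succ f =>
      rw [PySem.Chars.count.go.eq_def]
      have hf' : t.length ≤ f := by simp at hf; omega
      by_cases hc : c = h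
      · subst hc
        simp [ih _ _ hf', List.count_cons]
        omega
      · have hb : (c == h) = false := by simp [hc]
        have hb2 : (h == c) = false := by simp [Ne.symm hc]
        simp [hb2, hc, ih _ _ hf', List.count_cons]

theorem count_single (cs : List Char) (c : Char) :
    PySem.Chars.count cs [c] = cs.count c := by
  have := count_go_single c cs cs.length 0 le_rfl
  simpa [PySem.Chars.count] using this

-- the list of indices of character c below m, in increasing order
def idxOf (cs : List Char) (c : Char) (m : Nat) : List Nat :=
  (List.range m).filter (fun i => cs[i]? == some c)

-- pyRange(0, m) is just List.range m, cast to Int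
theorem pyRange_nat (m : Nat) :
    PySem.List.pyRange 0 (m : Int) 1 = (List.range m).map (fun k => Int.ofNat k) := by
  unfold PySem.List.pyRange
  rcases Nat.eq_zero_or_pos m with h | h
  · subst h; norm_num
  · have h0 : (0:Int) < m := by exact_mod_cast h
    simp only [if_neg one_ne_zero, if_pos zero_lt_one, if_pos h0]
    norm_num

-- A's loop builds exactly the four index lists
theorem loop_spec (n : String) (m : Nat) (hm : m ≤ n.toList.length) :
    (((List.range m).map (fun k => Int.ofNat k)).foldl
        (fun (s : List Int × List Int × List Int × List Int) i =>
          if PySem.Str.pyGet? n i == some '0' then (s.1 ++ [i], s.2.1, s.2.2.1, s.2.2.2)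
          else if PySem.Str.pyGet? n i == some '1' then (s.1, s.2.1 ++ [i], s.2.2.1, s.2.2.2)
          else if PySem.Str.pyGet? n i == some '2' then (s.1, s.2.1, s.2.2.1 ++ [i], s.2.2.2)
          else if PySem.Str.pyGet? n i == some '3' then (s.1, s.2.1, s.2.2.1, s.2.2.2 ++ [i])
          else s) ([], [], [], [])) =
      ((idxOf n.toList '0' m).map (fun k => Int.ofNat k),
       (idxOf n.toList '1' m).map (fun k => Int.ofNat k),
       (idxOf n.toList '2' m).map (fun k => Int.ofNat k),
       (idxOf n.toList '3' m).map (fun k => Int.ofNat k)) := by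
  induction m with
  | zero => simp [idxOf]
  | succ k ih =>
    have hk : k ≤ n.toList.length := by omega
    rw [List.range_succ, List.map_append, List.foldl_append, ih hk]
    simp only [List.map_cons, List.map_nil, List.foldl_cons, List.foldl_nil]
    have hget : PySem.Str.pyGet? n (Int.ofNat k) = n.toList[k]? := by
      simp [PySem.Str.pyGet?_eq, PySem.Chars.pyGet?_eq_listPyGet?, Int.ofNat_eq_natCast, PySem.List.pyGet?_natCast]
    have hidx : ∀ c : Char, idxOf n.toList c (k+1) =
        idxOf n.toList c k ++ (if n.toList[k]? == some c then [k] else []) := by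
      intro c
      unfold idxOf
      rw [List.range_succ, List.filter_append]
      by_cases h : n.toList[k]? == some c <;> simp [h]
    rw [hget]
    by_cases h0 : n.toList[k]? == some '0'
    · have hv : n.toList[k]? = some '0' := by simpa using h0
      simp [hv, hidx]
    · by_cases h1 : n.toList[k]? == some '1'
      · have hv : n.toList[k]? = some '1' := by simpa using h1
        have h0' : ¬ n.toList[k]? = some '0' := by simpa using h0
        simp [hv, h0', hidx]
      · by_cases h2 : n.toList[k]? == some '2'
        · have hv : n.toList[k]? = some '2' := by simpa using h2
          have h0' : ¬ n.toList[k]? = some '0' := by simpa using h0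
          have h1' : ¬ n.toList[k]? = some '1' := by simpa using h1
          simp [hv, h0', h1', hidx]
        · by_cases h3 : n.toList[k]? == some '3'
          · have hv : n.toList[k]? = some '3' := by simpa using h3
            have h0' : ¬ n.toList[k]? = some '0' := by simpa using h0
            have h1' : ¬ n.toList[k]? = some '1' := by simpa using h1
            have h2' : ¬ n.toList[k]? = some '2' := by simpa using h2
            simp [hv, h0', h1', h2', hidx]
          · have h0' : ¬ n.toList[k]? = some '0' := by simpa using h0
            have h1' : ¬ n.toList[k]? = some '1' := by simpa using h1
            have h2' : ¬ n.toList[k]? = some '2' := by simpa using h2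
            have h3' : ¬ n.toList[k]? = some '3' := by simpa using h3
            simp [h0', h1', h2', h3', hidx]

-- li[len(li)-1] is the last element
theorem pyGet_last (li : List Int) (h : li ≠ []) :
    PySem.List.pyGet? li ((li.length : Int) - 1) = li.getLast? := by
  have hl : 1 ≤ li.length := List.length_pos_iff.mpr h
  have hcast : ((li.length : Int) - 1) = ((li.length - 1 : Nat) : Int) := by omega
  rw [hcast, PySem.List.pyGet?_natCast, List.getLast?_eq_getElem?]

-- the index list is nonempty iff the character occurs
theorem idxOf_ne_nil (cs : List Char) (c : Char) :
    idxOf cs c cs.length ≠ [] ↔ c ∈ cs := by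
  unfold idxOf
  rw [Ne, List.filter_eq_nil_iff]
  push_neg
  constructor
  · rintro ⟨i, hi, hp⟩
    simp at hp
    exact List.mem_of_getElem? hp
  · intro hc
    obtain ⟨i, hi, hv⟩ := List.mem_iff_getElem.mp hc
    exact ⟨i, by simp [hi], by simp [List.getElem?_eq_getElem hi, hv]⟩

-- A's replace-chain result is the filter of the non-alphabet characters
theorem chain_toList (n : String) :
    (PySem.Str.replace (PySem.Str.replace (PySem.Str.replace
      (PySem.Str.replace n "0" "") "1" "") "2" "") "3" "").toList =
    n.toList.filter (fun x => !(x == '0') && !(x == '1') && !(x == '2') && !(x == '3')) := by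
  simp only [PySem.Str.toList_replace]
  rw [show ("0" : String).toList = ['0'] from rfl, show ("1" : String).toList = ['1'] from rfl,
      show ("2" : String).toList = ['2'] from rfl, show ("3" : String).toList = ['3'] from rfl,
      show ("" : String).toList = [] from rfl]
  rw [replace_single, replace_single, replace_single, replace_single]
  rw [List.filter_filter, List.filter_filter, List.filter_filter]
  congr 1
  funext x
  by_cases h0 : x = '0' <;> by_cases h1 : x = '1' <;> simp [h0, h1, Bool.and_comm, Bool.and_assoc]

-- counts as memberships
theorem count_mem_iff (n : String) (c : Char) (s : String) (hs : s.toList = [c]) :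
    (1 ≤ PySem.Str.count n s) ↔ c ∈ n.toList := by
  rw [PySem.Str.count_eq, hs, count_single]
  exact List.count_pos_iff

-- ---------- B-side characterisation ----------

-- the "first of the pair met so far" record after also scanning l, as a function
def ext (p : Char → Bool) (one : Char) (l : List Char) (ok : Option Bool) : Option Bool :=
  match ok with
  | some b => some b
  | none => (l.find? p).map (fun c => c == one)

def alphaB (c : Char) : Bool := c == '0' || c == '1' || c == '2' || c == '3'
def p01 (c : Char) : Bool := c == '0' || c == '1'
def p23 (c : Char) : Bool := c == '2' || c == '3'

theorem ext_some (p : Char → Bool) (one : Char) (l : List Char) (b : Bool) :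
    ext p one l (some b) = some b := rfl

-- what B's loop computes, as a closed expression over its input and accumulators
theorem go_spec : ∀ (l : List Char) (s0 s1 s2 s3 : Bool) (ok01 ok23 : Option Bool),
    judgeQAltGo l s0 s1 s2 s3 ok01 ok23 =
      (l.all alphaB && (s0 || l.contains '0') && (s1 || l.contains '1') &&
       (s2 || l.contains '2') && (s3 || l.contains '3') &&
       (ext p01 '1' l ok01).getD false && (ext p23 '3' l ok23).getD false) := by
  intro l
  induction l with
  | nil =>
    intro s0 s1 s2 s3 ok01 ok23
    cases ok01 <;> cases ok23 <;> simp [judgeQAltGo, ext]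
  | cons c rest ih =>
    intro s0 s1 s2 s3 ok01 ok23
    by_cases h0 : c = '0'
    · subst h0
      rw [judgeQAltGo, if_pos (by decide), ih]
      have he01 : ext p01 '1' ('0' :: rest) ok01 = some (ok01.getD false) := by
        cases ok01 <;> simp [ext, List.find?_cons, p01]
      have he23 : ext p23 '3' ('0' :: rest) ok23 = ext p23 '3' rest ok23 := by
        cases ok23 <;> simp [ext, List.find?_cons, p23]
      simp [he01, he23, ext_some, alphaB]
    · by_cases h1 : c = '1'
      · subst h1
        rw [judgeQAltGo, if_neg (by decide), if_pos (by decide), ih]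
        have he01 : ext p01 '1' ('1' :: rest) ok01 = some (ok01.getD true) := by
          cases ok01 <;> simp [ext, List.find?_cons, p01]
        have he23 : ext p23 '3' ('1' :: rest) ok23 = ext p23 '3' rest ok23 := by
          cases ok23 <;> simp [ext, List.find?_cons, p23]
        simp [he01, he23, ext_some, alphaB]
      · by_cases h2 : c = '2'
        · subst h2
          rw [judgeQAltGo, if_neg (by decide), if_neg (by decide), if_pos (by decide), ih]
          have he01 : ext p01 '1' ('2' :: rest) ok01 = ext p01 '1' rest ok01 := by
            cases ok01 <;> simp [ext, List.find?_cons, p01]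
          have he23 : ext p23 '3' ('2' :: rest) ok23 = some (ok23.getD false) := by
            cases ok23 <;> simp [ext, List.find?_cons, p23]
          simp [he01, he23, ext_some, alphaB]
        · by_cases h3 : c = '3'
          · subst h3
            rw [judgeQAltGo, if_neg (by decide), if_neg (by decide), if_neg (by decide),
                if_pos (by decide), ih]
            have he01 : ext p01 '1' ('3' :: rest) ok01 = ext p01 '1' rest ok01 := by
              cases ok01 <;> simp [ext, List.find?_cons, p01]
            have he23 : ext p23 '3' ('3' :: rest) ok23 = some (ok23.getD true) := by
              cases ok23 <;> simp [ext, List.find?_cons, p23]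
            simp [he01, he23, ext_some, alphaB]
          · rw [judgeQAltGo, if_neg (by simp [h0]), if_neg (by simp [h1]),
                if_neg (by simp [h2]), if_neg (by simp [h3])]
            have : alphaB c = false := by simp [alphaB, h0, h1, h2, h3]
            simp [this]

-- getLast? of a filtered range is "the largest index below m satisfying p"
theorem getLast?_filter_range (p : Nat → Bool) : ∀ (m j : Nat),
    (((List.range m).filter p).getLast? = some j) ↔
      (j < m ∧ p j = true ∧ ∀ k, j < k → k < m → p k = false) := by
  intro m
  induction m with
  | zero => intro j; simp
  | succ m ih =>
    intro j
    rw [List.range_succ, List.filter_append]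
    by_cases hp : p m
    · have h1 : List.filter p [m] = [m] := by simp [hp]
      rw [h1, List.getLast?_append_of_ne_nil _ (by simp)]
      constructor
      · rintro h
        have : j = m := by simpa using h.symm
        subst this
        exact ⟨by omega, hp, fun k hk1 hk2 => by omega⟩
      · rintro ⟨hjm, hpj, hmax⟩
        have : j = m := by
          by_contra hne
          have hjm' : j < m := by omega
          have := hmax m hjm' (by omega)
          rw [hp] at this; exact absurd this (by simp)
        subst this; simp
    · have hpf : p m = false := by simpa using hp
      have h1 : List.filter p [m] = [] := by simp [hpf]
      rw [h1, List.append_nil, ih]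
      constructor
      · rintro ⟨hjm, hpj, hmax⟩
        refine ⟨by omega, hpj, fun k hk1 hk2 => ?_⟩
        by_cases hkm : k = m
        · subst hkm; exact hpf
        · exact hmax k hk1 (by omega)
      · rintro ⟨hjm, hpj, hmax⟩
        have hjm' : j < m := by
          by_contra h
          have : j = m := by omega
          subst this; rw [hpf] at hpj; exact absurd hpj (by simp)
        exact ⟨hjm', hpj, fun k hk1 hk2 => hmax k hk1 (by omega)⟩

-- getLast? of a char filter, through the last satisfying index
theorem filter_chars_last (p : Char → Bool) : ∀ (cs : List Char),
    (cs.filter p).getLast? =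
      ((((List.range cs.length).filter (fun i => (cs[i]?.map p).getD false)).getLast?).bind
        (fun j => cs[j]?)) := by
  intro cs
  induction cs using List.reverseRecOn with
  | nil => simp
  | append_singleton cs c ih =>
    rw [List.filter_append, List.length_append]
    simp only [List.length_cons, List.length_nil]
    rw [List.range_succ, List.filter_append]
    have hgetc : (cs ++ [c])[cs.length]? = some c := by simp
    have hcongr : (List.range cs.length).filter
        (fun i => (((cs ++ [c])[i]?).map p).getD false) =
        (List.range cs.length).filter (fun i => ((cs[i]?).map p).getD false) := by
      apply List.filter_congr
      intro i hi
      have hi' : i < cs.length := List.mem_range.mp hi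
      rw [List.getElem?_append_left hi']
    by_cases hp : p c
    · have h1 : List.filter p [c] = [c] := by simp [hp]
      have h2 : List.filter (fun i => (((cs ++ [c])[i]?).map p).getD false) [cs.length] = [cs.length] := by
        simp [hgetc, hp]
      rw [h1, h2, List.getLast?_append_of_ne_nil _ (by simp),
          List.getLast?_append_of_ne_nil _ (by simp)]
      simp [hgetc]
    · have hpf : p c = false := by simpa using hp
      have h1 : List.filter p [c] = [] := by simp [hpf]
      have h2 : List.filter (fun i => (((cs ++ [c])[i]?).map p).getD false) [cs.length] = [] := by
        simp [hgetc, hpf]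
      rw [h1, h2, List.append_nil, List.append_nil, hcongr, ih]
      cases hlast : ((List.range cs.length).filter (fun i => ((cs[i]?).map p).getD false)).getLast? with
      | none => simp
      | some j =>
        have hj : j < cs.length := by
          have hmem := List.mem_of_getLast? hlast
          have := List.mem_filter.mp hmem
          exact List.mem_range.mp this.1
        simp [List.getElem?_append_left hj]

-- last index of the joint pair filter is the max of the two last indices
theorem pair_last (cs : List Char) (a b : Char) (hab : a ≠ b) (pa : Char → Bool)
    (hpa : ∀ c, pa c = (c == a || c == b)) (ia ib : Nat)
    (ha : (idxOf cs a cs.length).getLast? = some ia)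
    (hb : (idxOf cs b cs.length).getLast? = some ib) :
    (cs.filter pa).getLast? = some (if ia < ib then b else a) := by
  unfold idxOf at ha hb
  rw [getLast?_filter_range] at ha hb
  obtain ⟨hia, hpia, hmaxa⟩ := ha
  obtain ⟨hib, hpib, hmaxb⟩ := hb
  have hva : cs[ia]? = some a := by simpa using hpia
  have hvb : cs[ib]? = some b := by simpa using hpib
  have hne : ia ≠ ib := by
    intro h; subst h; rw [hva] at hvb; exact hab (by simpa using hvb)
  have hpred : ∀ i : Nat, ((cs[i]?.map pa).getD false) =
      ((cs[i]? == some a) || (cs[i]? == some b)) := by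
    intro i
    cases hv : cs[i]? with
    | none => simp
    | some c =>
      simp [hpa c]
  rw [filter_chars_last]
  have hjoint : ((List.range cs.length).filter
      (fun i => (cs[i]?.map pa).getD false)).getLast? = some (max ia ib) := by
    rw [getLast?_filter_range]
    refine ⟨by omega, ?_, ?_⟩
    · rw [hpred]
      rcases Nat.lt_or_ge ia ib with h | h
      · rw [Nat.max_eq_right (by omega), hvb]; simp
      · rw [Nat.max_eq_left h, hva]; simp
    · intro k hk1 hk2
      rw [hpred]
      have h1 := hmaxa k (by omega) hk2
      have h2 := hmaxb k (by omega) hk2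
      simp at h1 h2 ⊢
      exact ⟨h1, h2⟩
  rw [hjoint]
  rcases Nat.lt_or_ge ia ib with h | h
  · rw [Nat.max_eq_right (by omega)]
    simp [hvb, h]
  · rw [Nat.max_eq_left h]
    have : ¬ ia < ib := by omega
    simp [hva, this]

-- ===== VERDICT (by name: the statement is the Claim_ definition above) =====
theorem judgeQ_spec : Claim_equal_judgeQ := by
  intro n _ hpre
  unfold Spec_judgeQ judgeQ judgeQ_alt
  by_cases hz : (PySem.Str.pyGet? n 0 == some '0') = true
  · rw [if_pos hz, if_pos hz]
  · rw [if_neg hz, if_neg hz]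
    rw [go_spec]
    simp only [List.all_reverse, List.contains_reverse, Bool.false_or]
    have hext01 : ext p01 '1' n.toList.reverse none =
        ((n.toList.filter p01).getLast?).map (fun c => c == '1') := by
      show (n.toList.reverse.find? p01).map (fun c => c == '1') = _
      rw [← List.head?_filter, List.filter_reverse, List.head?_reverse]
    have hext23 : ext p23 '3' n.toList.reverse none =
        ((n.toList.filter p23).getLast?).map (fun c => c == '3') := by
      show (n.toList.reverse.find? p23).map (fun c => c == '3') = _
      rw [← List.head?_filter, List.filter_reverse, List.head?_reverse]
    by_cases halpha : ∀ x ∈ n.toList, x = '0' ∨ x = '1' ∨ x = '2' ∨ x = '3'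
    · have hallB : n.toList.all alphaB = true := by
        rw [List.all_eq_true]
        intro x hx
        rcases halpha x hx with rfl | rfl | rfl | rfl <;> decide
      have hchain : (PySem.Str.replace (PySem.Str.replace (PySem.Str.replace
            (PySem.Str.replace n "0" "") "1" "") "2" "") "3" "") = "" := by
        rw [← String.toList_eq_nil_iff, chain_toList, List.filter_eq_nil_iff]
        intro x hx
        rcases halpha x hx with rfl | rfl | rfl | rfl <;> simp
      rw [if_pos hchain]
      by_cases hcov : '0' ∈ n.toList ∧ '1' ∈ n.toList ∧ '2' ∈ n.toList ∧ '3' ∈ n.toList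
      · obtain ⟨h0m, h1m, h2m, h3m⟩ := hcov
        rw [if_pos ⟨(count_mem_iff n '0' "0" rfl).mpr h0m, (count_mem_iff n '1' "1" rfl).mpr h1m,
                   (count_mem_iff n '2' "2" rfl).mpr h2m, (count_mem_iff n '3' "3" rfl).mpr h3m⟩]
        have hlen : PySem.Str.len n = (n.toList.length : Int) := PySem.Str.len_eq n
        rw [hlen, pyRange_nat, loop_spec n n.toList.length le_rfl]
        have hne0 : idxOf n.toList '0' n.toList.length ≠ [] := (idxOf_ne_nil _ _).mpr h0m
        have hne1 : idxOf n.toList '1' n.toList.length ≠ [] := (idxOf_ne_nil _ _).mpr h1m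
        have hne2 : idxOf n.toList '2' n.toList.length ≠ [] := (idxOf_ne_nil _ _).mpr h2m
        have hne3 : idxOf n.toList '3' n.toList.length ≠ [] := (idxOf_ne_nil _ _).mpr h3m
        obtain ⟨i0, hi0⟩ := Option.isSome_iff_exists.mp (List.getLast?_isSome.mpr hne0)
        obtain ⟨i1, hi1⟩ := Option.isSome_iff_exists.mp (List.getLast?_isSome.mpr hne1)
        obtain ⟨i2, hi2⟩ := Option.isSome_iff_exists.mp (List.getLast?_isSome.mpr hne2)
        obtain ⟨i3, hi3⟩ := Option.isSome_iff_exists.mp (List.getLast?_isSome.mpr hne3)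
        have hlast : ∀ (c : Char) (i : Nat), (idxOf n.toList c n.toList.length).getLast? = some i →
            (idxOf n.toList c n.toList.length ≠ []) →
            PySem.List.pyGet? ((idxOf n.toList c n.toList.length).map (fun k => Int.ofNat k))
              ((((idxOf n.toList c n.toList.length).map (fun k => Int.ofNat k)).length : Int) - 1) =
              some (Int.ofNat i) := by
          intro c i hi hne
          rw [pyGet_last _ (by simpa using hne), List.getLast?_map, hi]
          rfl
        have hp01 := pair_last n.toList '0' '1' (by decide) p01 (fun c => rfl) i0 i1 hi0 hi1
        have hp23 := pair_last n.toList '2' '3' (by decide) p23 (fun c => rfl) i2 i3 hi2 hi3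
        simp only [hlast '0' i0 hi0 hne0, hlast '1' i1 hi1 hne1, hlast '2' i2 hi2 hne2,
                   hlast '3' i3 hi3 hne3]
        rw [hext01, hext23, hp01, hp23]
        have hmem0 : n.toList.contains '0' = true := by simpa using h0m
        have hmem1 : n.toList.contains '1' = true := by simpa using h1m
        have hmem2 : n.toList.contains '2' = true := by simpa using h2m
        have hmem3 : n.toList.contains '3' = true := by simpa using h3m
        rw [hallB, hmem0, hmem1, hmem2, hmem3]
        by_cases h01 : i0 < i1 <;> by_cases h23 : i2 < i3 <;>
          simp [h01, h23]
      · rw [if_neg]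
        · have : '0' ∉ n.toList ∨ '1' ∉ n.toList ∨ '2' ∉ n.toList ∨ '3' ∉ n.toList := by
            by_contra hc
            push_neg at hc
            exact absurd ⟨hc.1, hc.2.1, hc.2.2.1, hc.2.2.2⟩ hcov
          rcases this with h | h | h | h <;> simp [h]
        · intro ⟨c0, c1, c2, c3⟩
          exact hcov ⟨(count_mem_iff n '0' "0" rfl).mp c0, (count_mem_iff n '1' "1" rfl).mp c1,
                      (count_mem_iff n '2' "2" rfl).mp c2, (count_mem_iff n '3' "3" rfl).mp c3⟩
    · have hallB : n.toList.all alphaB = false := by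
        by_contra h
        have h' := Bool.not_eq_false _ |>.mp h
        rw [List.all_eq_true] at h'
        apply halpha
        intro x hx
        have := h' x hx
        simp [alphaB] at this
        tauto
      rw [if_neg]
      · simp [hallB]
      · rw [← String.toList_eq_nil_iff, chain_toList, List.filter_eq_nil_iff]
        intro hall
        apply halpha
        intro x hx
        have := hall x hx
        by_cases h0 : x = '0'
        · exact Or.inl h0
        · by_cases h1 : x = '1'
          · exact Or.inr (Or.inl h1)
          · by_cases h2 : x = '2'
            · exact Or.inr (Or.inr (Or.inl h2))
            · by_cases h3 : x = '3'
              · exact Or.inr (Or.inr (Or.inr h3))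
              · simp [h0, h1, h2, h3] at this
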